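-- pv_equiv track=rewrite | github.com/jared-goering/arborist | arborist/strategies/hybrid.py | _is_descendant_of
-- ===== SOURCE A (Python) =====
-- from typing import Any
--
-- def _is_descendant_of(
--
--     node: dict[str, Any],
--     root_id: str,
--     completed: list[dict[str, Any]],
-- ) -> bool:
--     """Check if node is a child or descendant of root_id."""
--     # Build parent lookup from completed nodes
--     parent_lookup: dict[str, str | None] = {
--         n["id"]: n.get("parent_id") for n in completed
--     }
--     # Also include the candidate itself
--     current_parent = node.get("parent_id")
--     visited: set[str | None] = set()
--     while current_parent and current_parent not in visited:
--         if current_parent == root_id: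
--             return True
--         visited.add(current_parent)
--         current_parent = parent_lookup.get(current_parent)
--     return False
-- ===== SOURCE B (Python) =====
-- def _is_descendant_of(node, root_id, completed):
--     """Reverse reachability: repeatedly grow the set of ids from which root_id
--     is reachable by closing over child->parent edges, then test the candidate's
--     parent for membership (no chain walk, no visited set)."""
--     parent_of = {n["id"]: n.get("parent_id") for n in completed}
--     if not root_id:
--         return False
--     reaches = {root_id}
--     for _ in range(len(completed) + 1):
--         changed = False
--         for child, parent in parent_of.items():
--             if child and parent in reaches and child not in reaches:
--                 reaches.add(child)
--                 changed = True
--         if not changed: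
--             break
--     start = node.get("parent_id")
--     return bool(start) and start in reaches
-- ===== Notes on version B (the rewrite author's own statement) =====
-- stated objective: alternative
-- what changed: B reverses the direction of the search: instead of walking node's parent chain upward with a visited set, it computes by fixpoint iteration the set of all ids from which root_id is reachable along child->parent edges, then answers with one membership test on node's parent.
import Mathlib
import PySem

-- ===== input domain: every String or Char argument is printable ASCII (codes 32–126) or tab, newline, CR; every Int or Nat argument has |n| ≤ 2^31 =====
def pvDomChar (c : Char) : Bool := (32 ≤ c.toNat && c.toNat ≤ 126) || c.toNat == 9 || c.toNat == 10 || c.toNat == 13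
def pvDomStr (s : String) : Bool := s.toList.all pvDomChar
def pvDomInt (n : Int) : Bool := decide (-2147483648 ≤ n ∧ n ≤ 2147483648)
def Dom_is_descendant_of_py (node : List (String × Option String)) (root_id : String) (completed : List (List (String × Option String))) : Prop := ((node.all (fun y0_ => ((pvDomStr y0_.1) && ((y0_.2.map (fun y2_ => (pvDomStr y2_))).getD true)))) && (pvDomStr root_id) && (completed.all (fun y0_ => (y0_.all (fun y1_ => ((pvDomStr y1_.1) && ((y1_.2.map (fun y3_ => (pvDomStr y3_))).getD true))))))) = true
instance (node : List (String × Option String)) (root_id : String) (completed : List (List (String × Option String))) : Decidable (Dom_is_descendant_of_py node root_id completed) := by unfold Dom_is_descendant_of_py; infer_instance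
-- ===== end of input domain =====

-- B replaces A's upward parent-chain walk (visited set, early return) by a reverse-reachability
-- fixpoint: it grows the set of ids that reach root_id along child->parent edges, then tests
-- node's parent for membership; return-value equivalence on Pre_ (every completed node has an "id" key).


-- ===== PORT A =====
-- parent_lookup = {n["id"]: n.get("parent_id") for n in completed}; keys are the Python
-- values n["id"] (str | None, here Option String); the skip branch is unreachable under Pre_.
-- (B's dict comprehension is the identical expression, so this helper is shared by both ports.)
def pvBuildLookup (completed : List (List (String × Option String))) :
    PySem.Dict (Option String) (Option String) :=
  completed.foldl (fun d n =>
    match PySem.Dict.get? (PySem.Dict.mk n) "id" with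
    | some k => d.insert k (PySem.Dict.getD (PySem.Dict.mk n) "parent_id" none)
    | none => d) PySem.Dict.empty

-- while current_parent and current_parent not in visited: …
-- fuel = completed.length + 2 always suffices: each non-returning iteration adds a fresh
-- string to visited, and every value of current_parent is the initial one or a dict value.
def pvLoopA (lookup : PySem.Dict (Option String) (Option String)) (root_id : String) :
    Nat → PySem.Set String → Option String → Bool
  | 0, _, _ => false
  | fuel+1, visited, cp =>
    match cp with
    | none => false
    | some s =>
      if s = "" then false
      else if PySem.Set.contains visited s then false
      else if s = root_id then true
      else pvLoopA lookup root_id fuel (PySem.Set.add visited s)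
             (PySem.Dict.getD lookup (some s) none)

def is_descendant_of_py (node : List (String × Option String)) (root_id : String) (completed : List (List (String × Option String))) : Bool :=
  pvLoopA (pvBuildLookup completed) root_id (completed.length + 2)
    PySem.Set.empty (PySem.Dict.getD (PySem.Dict.mk node) "parent_id" none)

-- ===== PORT B =====
-- inner loop body: if child and parent in reaches and child not in reaches: reaches.add(child); changed = True
def pvRoundStep (rc : PySem.Set String × Bool) (it : Option String × Option String) :
    PySem.Set String × Bool :=
  match it.1 with
  | none => rc
  | some c =>
    if (!(c == "")) && (match it.2 with
                        | some p => PySem.Set.contains rc.1 p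
                        | none => false)
              && (!(PySem.Set.contains rc.1 c))
    then (PySem.Set.add rc.1 c, true)
    else rc

-- for _ in range(len(completed)+1): changed = False; <inner loop>; if not changed: break
def pvClose (items : List (Option String × Option String)) :
    Nat → PySem.Set String → PySem.Set String
  | 0, r => r
  | fuel+1, r =>
    let rc := items.foldl pvRoundStep (r, false)
    if rc.2 then pvClose items fuel rc.1 else rc.1

def is_descendant_of_py_alt (node : List (String × Option String)) (root_id : String) (completed : List (List (String × Option String))) : Bool :=
  let parent_of := pvBuildLookup completed
  if root_id == "" then false
  else
    let reaches := pvClose parent_of.items (completed.length + 1)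
        (PySem.Set.add PySem.Set.empty root_id)
    match PySem.Dict.getD (PySem.Dict.mk node) "parent_id" none with
    | none => false
    | some s => (!(s == "")) && PySem.Set.contains reaches s

-- ===== PRECONDITION & SPEC =====
-- A's dict comprehension evaluates n["id"] for every n in completed, so A (and B, which builds
-- the same dict first) raises KeyError exactly when some completed node lacks the key "id";
-- Pre_ excludes exactly those inputs.
def Pre_is_descendant_of_py (node : List (String × Option String)) (root_id : String) (completed : List (List (String × Option String))) : Prop :=
  ∀ n ∈ completed, PySem.Dict.contains (PySem.Dict.mk n) "id" = true
instance (node : List (String × Option String)) (root_id : String) (completed : List (List (String × Option String))) : Decidable (Pre_is_descendant_of_py node root_id completed) := by unfold Pre_is_descendant_of_py; infer_instance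

def pvWitness_is_descendant_of_py : (List (String × Option String)) × String × (List (List (String × Option String))) :=
  ([("parent_id", some "a")], "r", [[("id", some "a"), ("parent_id", some "r")]])

def Spec_is_descendant_of_py (node : List (String × Option String)) (root_id : String) (completed : List (List (String × Option String))) (out : Bool) : Prop := out = is_descendant_of_py_alt node root_id completed
instance (node : List (String × Option String)) (root_id : String) (completed : List (List (String × Option String))) (out : Bool) : Decidable (Spec_is_descendant_of_py node root_id completed out) := by unfold Spec_is_descendant_of_py; infer_instance

-- ===== CLAIM (what is proved, stated in full; the proofs are below) =====
def Claim_equal_is_descendant_of_py : Prop := ∀ (node : List (String × Option String)) (root_id : String) (completed : List (List (String × Option String))), Dom_is_descendant_of_py node root_id completed → Pre_is_descendant_of_py node root_id completed → Spec_is_descendant_of_py node root_id completed (is_descendant_of_py node root_id completed)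

-- ===== LEMMAS AND PROOFS =====

-- "root_id is reachable from s in at most k child->parent steps", phrased through the start
-- set R (in use, R = {root_id}); the common yardstick both ports are measured against.
def pvReachS (L : PySem.Dict (Option String) (Option String)) (R : PySem.Set String) :
    Nat → String → Bool
  | 0, s => PySem.Set.contains R s
  | k+1, s => PySem.Set.contains R s ||
      ((!(s == "")) && (match PySem.Dict.getD L (some s) none with
                        | some p => pvReachS L R k p
                        | none => false))

lemma pvReachS_unfold (L : PySem.Dict (Option String) (Option String)) (R : PySem.Set String)
    (k : Nat) (s : String) :
    pvReachS L R (k+1) s = (PySem.Set.contains R s ||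
      ((!(s == "")) && (match PySem.Dict.getD L (some s) none with
                        | some p => pvReachS L R k p
                        | none => false))) := rfl

-- A1: a successful A-walk yields a reach certificate shorter than the fuel.
lemma pvLoopA_reach (L : PySem.Dict (Option String) (Option String)) (root : String)
    (R0 : PySem.Set String) (hR0 : ∀ x, PySem.Set.contains R0 x = (x == root)) :
    ∀ (fuel : Nat) (visited : PySem.Set String) (s : String),
      pvLoopA L root fuel visited (some s) = true →
      ∃ k, k < fuel ∧ pvReachS L R0 k s = true := by
  intro fuel
  induction fuel with
  | zero => intro _ s h; exact absurd h (by simp [pvLoopA])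
  | succ f ih =>
    intro visited s h
    simp only [pvLoopA] at h
    by_cases h1 : s = ""
    · rw [if_pos h1] at h; exact absurd h (by simp)
    · rw [if_neg h1] at h
      by_cases h2 : PySem.Set.contains visited s = true
      · rw [if_pos h2] at h; exact absurd h (by simp)
      · rw [if_neg h2] at h
        by_cases h3 : s = root
        · refine ⟨0, by omega, ?_⟩
          show PySem.Set.contains R0 s = true
          rw [hR0, h3]; simp
        · rw [if_neg h3] at h
          cases hL : PySem.Dict.getD L (some s) none with
          | none =>
            rw [hL] at h
            have hnone : ∀ g v, pvLoopA L root g v (none : Option String) = false := by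
              intro g v; cases g <;> rfl
            rw [hnone] at h; exact absurd h (by simp)
          | some p =>
            rw [hL] at h
            obtain ⟨k, hkf, hr⟩ := ih _ p h
            refine ⟨k+1, by omega, ?_⟩
            rw [pvReachS_unfold, hL]
            simp only [Bool.or_eq_true, Bool.and_eq_true]
            exact Or.inr ⟨by simp [h1], hr⟩

-- A2: a reach certificate below the fuel makes the A-walk succeed, provided nothing in
-- visited reaches root at least as fast.
lemma pvReach_loopA (L : PySem.Dict (Option String) (Option String)) (root : String)
    (R0 : PySem.Set String) (hR0 : ∀ x, PySem.Set.contains R0 x = (x == root))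
    (hroot : root ≠ "") :
    ∀ (k : Nat) (s : String) (visited : PySem.Set String) (fuel : Nat),
      pvReachS L R0 k s = true →
      (∀ x, PySem.Set.contains visited x = true → ∀ j ≤ k, pvReachS L R0 j x = false) →
      k < fuel →
      pvLoopA L root fuel visited (some s) = true := by
  intro k
  induction k using Nat.strong_induction_on with
  | _ k IH =>
  intro s visited fuel hreach hvis hfuel
  by_cases hmin : ∃ j, j < k ∧ pvReachS L R0 j s = true
  · obtain ⟨j, hjk, hj⟩ := hmin
    exact IH j hjk s visited fuel hj
      (fun x hx i hi => hvis x hx i (by omega)) (by omega)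
  · push_neg at hmin
    obtain ⟨f, rfl⟩ : ∃ f, fuel = f + 1 := ⟨fuel - 1, by omega⟩
    have hnv : PySem.Set.contains visited s = false := by
      by_contra hc
      have := hvis s (by simpa using hc) k le_rfl
      rw [hreach] at this; exact absurd this (by simp)
    by_cases hroot_s : s = root
    · rw [hroot_s] at hnv ⊢
      have hnv' : root ∉ visited := fun hmem => by
        have hcm := (PySem.Set.contains_iff visited root).mpr hmem
        rw [hcm] at hnv
        exact absurd hnv (by simp)
      simp [pvLoopA, hroot, hnv']
    · have hk0 : k ≠ 0 := by
        intro h0; rw [h0] at hreach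
        have hcr : PySem.Set.contains R0 s = true := hreach
        rw [hR0] at hcr
        exact hroot_s (by simpa using hcr)
      obtain ⟨j, rfl⟩ : ∃ j, k = j + 1 := ⟨k - 1, by omega⟩
      rw [pvReachS_unfold] at hreach
      simp only [Bool.or_eq_true, Bool.and_eq_true] at hreach
      rcases hreach with hc | ⟨hne, hm⟩
      · rw [hR0] at hc; exact absurd (by simpa using hc) hroot_s
      · have hs1 : s ≠ "" := by simpa using hne
        cases hL : PySem.Dict.getD L (some s) none with
        | none => rw [hL] at hm; simp at hm
        | some p =>
          rw [hL] at hm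
          have hmp : pvReachS L R0 j p = true := hm
          have hstep : pvLoopA L root f (PySem.Set.add visited s) (some p) = true := by
            refine IH j (by omega) p (PySem.Set.add visited s) f hmp ?_ (by omega)
            intro x hx i hi
            have hx' : x ∈ visited ∨ x = s := by
              have := (PySem.Set.contains_iff (PySem.Set.add visited s) x).mp hx
              simpa [PySem.Set.mem_add] using this
            rcases hx' with hx' | rfl
            · exact hvis x ((PySem.Set.contains_iff visited x).mpr hx') i (by omega)
            · by_contra hcf
              exact absurd (eq_true_of_ne_false hcf) (hmin i (by omega))
          simp only [pvLoopA, if_neg hs1, hnv, Bool.false_eq_true, if_false,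
            if_neg hroot_s, hL]
          exact hstep

lemma pvLoopA_root_empty (L : PySem.Dict (Option String) (Option String)) :
    ∀ (fuel : Nat) (visited : PySem.Set String) (cp : Option String),
      pvLoopA L "" fuel visited cp = false := by
  intro fuel
  induction fuel with
  | zero => intro _ cp; rfl
  | succ f ih =>
    intro visited cp
    cases cp with
    | none => rfl
    | some s =>
      simp only [pvLoopA]
      by_cases h1 : s = ""
      · simp [h1]
      · simp [h1, ih]

-- one inner-loop step never removes elements …
lemma pvRoundStep_fst_mono (rc : PySem.Set String × Bool) (it : Option String × Option String)
    (x : String) (h : PySem.Set.contains rc.1 x = true) :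
    PySem.Set.contains (pvRoundStep rc it).1 x = true := by
  obtain ⟨cq, pq⟩ := it
  cases cq with
  | none => exact h
  | some c =>
    simp only [pvRoundStep]
    split_ifs with hc
    · have := (PySem.Set.contains_iff rc.1 x).mp h
      exact (PySem.Set.contains_iff _ x).mpr (by simp [PySem.Set.mem_add, this])
    · exact h

-- … nor does the whole inner loop.
lemma pvRound_fst_mono (its : List (Option String × Option String))
    (rc : PySem.Set String × Bool) (x : String) (h : PySem.Set.contains rc.1 x = true) :
    PySem.Set.contains (its.foldl pvRoundStep rc).1 x = true := by
  induction its generalizing rc with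
  | nil => exact h
  | cons it rest ih => exact ih _ (pvRoundStep_fst_mono rc it x h)

-- the changed flag never resets within a round.
lemma pvRoundStep_snd_mono (rc : PySem.Set String × Bool) (it : Option String × Option String)
    (h : rc.2 = true) : (pvRoundStep rc it).2 = true := by
  obtain ⟨cq, pq⟩ := it
  cases cq with
  | none => exact h
  | some c =>
    simp only [pvRoundStep]
    split_ifs <;> simp [h]

lemma pvRound_snd_mono (its : List (Option String × Option String))
    (rc : PySem.Set String × Bool) (h : rc.2 = true) : (its.foldl pvRoundStep rc).2 = true := by
  induction its generalizing rc with
  | nil => exact h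
  | cons it rest ih => exact ih _ (pvRoundStep_snd_mono rc it h)

-- a round that reports no change left the set unchanged and the set is closed under the edges.
lemma pvRound_unchanged (its : List (Option String × Option String)) (R : PySem.Set String)
    (h : (its.foldl pvRoundStep (R, false)).2 = false) :
    (its.foldl pvRoundStep (R, false)).1 = R ∧
    ∀ c p, (some c, some p) ∈ its → (c == "") = false →
      PySem.Set.contains R p = true → PySem.Set.contains R c = true := by
  induction its generalizing R with
  | nil => exact ⟨rfl, by simp⟩
  | cons it rest ih =>
    have hstep : pvRoundStep (R, false) it = (R, false) := by
      obtain ⟨cq, pq⟩ := it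
      cases cq with
      | none => rfl
      | some c =>
        simp only [pvRoundStep]
        split_ifs with hc
        · exfalso
          have hsnd : (rest.foldl pvRoundStep (PySem.Set.add R c, true)).2 = true :=
            pvRound_snd_mono rest _ rfl
          rw [List.foldl_cons] at h
          simp only [pvRoundStep, if_pos hc] at h
          rw [hsnd] at h; exact absurd h (by simp)
        · rfl
    rw [List.foldl_cons, hstep] at h
    obtain ⟨hR, hclosed⟩ := ih R h
    refine ⟨by rw [List.foldl_cons, hstep]; exact hR, ?_⟩
    intro c p hmem hc hp
    rcases List.mem_cons.mp hmem with heq | hmem'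
    · by_cases hcin : PySem.Set.contains R c = true
      · exact hcin
      · exfalso
        subst heq
        have hcf : PySem.Set.contains R c = false := Bool.eq_false_iff.mpr hcin
        simp only [pvRoundStep] at hstep
        rw [if_pos (by rw [hc, hp, hcf]; rfl)] at hstep
        have := congrArg Prod.snd hstep
        exact absurd this (by simp)
    · exact hclosed c p hmem' hc hp

-- if an edge (c, p) occurs in the round's worklist and p is already in the set, the round puts c in.
lemma pvRound_adds (its : List (Option String × Option String))
    (rc : PySem.Set String × Bool) (c p : String)
    (hmem : (some c, some p) ∈ its) (hc : (c == "") = false)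
    (hp : PySem.Set.contains rc.1 p = true) :
    PySem.Set.contains ((its.foldl pvRoundStep rc).1) c = true := by
  induction its generalizing rc with
  | nil => exact absurd hmem (by simp)
  | cons it rest ih =>
    rcases List.mem_cons.mp hmem with heq | hmem'
    · rw [List.foldl_cons]
      by_cases hcin : PySem.Set.contains rc.1 c = true
      · exact pvRound_fst_mono rest _ c (pvRoundStep_fst_mono rc _ c hcin)
      · have hcadd : PySem.Set.contains (pvRoundStep rc it).1 c = true := by
          subst heq
          have hcf : PySem.Set.contains rc.1 c = false := Bool.eq_false_iff.mpr hcin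
          simp only [pvRoundStep]
          rw [if_pos (by rw [hc, hp, hcf]; rfl)]
          exact (PySem.Set.contains_iff _ c).mpr (by simp [PySem.Set.mem_add])
        exact pvRound_fst_mono rest _ c hcadd
    · exact ih _ hmem' (pvRoundStep_fst_mono rc it p hp)

-- an edge certified by the dict is in the worklist.
lemma pvEdge_mem_items (L : PySem.Dict (Option String) (Option String)) (s p : String)
    (hL : PySem.Dict.getD L (some s) none = some p) :
    ((some s : Option String), (some p : Option String)) ∈ L.items := by
  have hg : PySem.Dict.get? L (some s) = some (some p) := by
    rw [PySem.Dict.getD_eq_get?_getD] at hL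
    cases hx : PySem.Dict.get? L (some s) with
    | none => rw [hx] at hL; exact absurd hL (by simp)
    | some v => rw [hx] at hL; simp at hL; rw [hL]
  exact PySem.Dict.mem_items_of_get?_eq_some L hg

-- one round advances every reach certificate by one step.
lemma pvRound_reach (L : PySem.Dict (Option String) (Option String)) (R : PySem.Set String)
    (k : Nat) (s : String) (h : pvReachS L R (k+1) s = true) :
    pvReachS L ((L.items.foldl pvRoundStep (R, false)).1) k s = true := by
  induction k generalizing s with
  | zero =>
    rw [pvReachS_unfold] at h
    simp only [Bool.or_eq_true, Bool.and_eq_true] at h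
    rcases h with h | ⟨hne, hm⟩
    · exact pvRound_fst_mono _ _ s h
    · cases hL : PySem.Dict.getD L (some s) none with
      | none => rw [hL] at hm; simp at hm
      | some p =>
        rw [hL] at hm
        have hmp : PySem.Set.contains R p = true := hm
        exact pvRound_adds L.items (R, false) s p (pvEdge_mem_items L s p hL)
          (by simpa using hne) hmp
  | succ k ih =>
    rw [pvReachS_unfold] at h
    rw [pvReachS_unfold]
    simp only [Bool.or_eq_true, Bool.and_eq_true] at h ⊢
    rcases h with h | ⟨hne, hm⟩
    · exact Or.inl (pvRound_fst_mono _ _ s h)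
    · refine Or.inr ⟨hne, ?_⟩
      cases hL : PySem.Dict.getD L (some s) none with
      | none => rw [hL] at hm; simp at hm
      | some p => rw [hL] at hm; exact ih p hm

-- a closed set already contains everything that reaches it.
lemma pvClosed_reach (L : PySem.Dict (Option String) (Option String)) (R : PySem.Set String)
    (hclosed : ∀ c p, (some c, some p) ∈ L.items → (c == "") = false →
      PySem.Set.contains R p = true → PySem.Set.contains R c = true) :
    ∀ k s, pvReachS L R k s = true → PySem.Set.contains R s = true := by
  intro k
  induction k with
  | zero => intro s h; exact h
  | succ k ih =>
    intro s h
    rw [pvReachS_unfold] at h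
    simp only [Bool.or_eq_true, Bool.and_eq_true] at h
    rcases h with h | ⟨hne, hm⟩
    · exact h
    · cases hL : PySem.Dict.getD L (some s) none with
      | none => rw [hL] at hm; simp at hm
      | some p =>
        rw [hL] at hm
        exact hclosed s p (pvEdge_mem_items L s p hL) (by simpa using hne) (ih p hm)

-- B-completeness: a certificate within the round budget lands in the closure.
lemma pvClose_complete (L : PySem.Dict (Option String) (Option String)) :
    ∀ (fuel : Nat) (R : PySem.Set String) (k : Nat) (s : String), k ≤ fuel →
      pvReachS L R k s = true →
      PySem.Set.contains (pvClose L.items fuel R) s = true := by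
  intro fuel
  induction fuel with
  | zero =>
    intro R k s hk h
    have hz : k = 0 := by omega
    rw [hz] at h; exact h
  | succ f ih =>
    intro R k s hk h
    simp only [pvClose]
    cases hch : (L.items.foldl pvRoundStep (R, false)).2 with
    | true =>
      rw [if_pos rfl]
      cases k with
      | zero => exact ih _ 0 s (by omega) (pvRound_fst_mono _ _ s h)
      | succ j => exact ih _ j s (by omega) (pvRound_reach L R j s h)
    | false =>
      rw [if_neg (by simp)]
      obtain ⟨hR, hclosed⟩ := pvRound_unchanged L.items R hch
      rw [hR]
      exact pvClosed_reach L R hclosed k s h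

-- B-soundness: everything in the closure carries a reach certificate.
lemma pvRound_sound (L : PySem.Dict (Option String) (Option String)) (R0 : PySem.Set String) :
    ∀ (its : List (Option String × Option String)),
      (∀ it ∈ its, PySem.Dict.get? L it.1 = some it.2) →
      ∀ (rc : PySem.Set String × Bool),
      (∀ x, PySem.Set.contains rc.1 x = true → ∃ k, pvReachS L R0 k x = true) →
      ∀ s, PySem.Set.contains (its.foldl pvRoundStep rc).1 s = true →
        ∃ k, pvReachS L R0 k s = true := by
  intro its
  induction its with
  | nil => intro _ rc hinv s hs; exact hinv s hs
  | cons it rest ih =>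
    intro hits rc hinv s hs
    refine ih (fun j hj => hits j (by simp [hj])) (pvRoundStep rc it) ?_ s hs
    intro x hx
    obtain ⟨cq, pq⟩ := it
    cases hcq : cq with
    | none =>
      rw [hcq] at hx
      exact hinv x hx
    | some c =>
      rw [hcq] at hx
      simp only [pvRoundStep] at hx
      split_ifs at hx with hc
      · have hx' : x ∈ rc.1 ∨ x = c := by
          have := (PySem.Set.contains_iff _ x).mp hx
          simpa [PySem.Set.mem_add] using this
        rcases hx' with hx' | rfl
        · exact hinv x ((PySem.Set.contains_iff rc.1 x).mpr hx')
        · simp only [Bool.and_eq_true] at hc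
          obtain ⟨⟨hcne, hpin⟩, _⟩ := hc
          cases hpq : pq with
          | none => rw [hpq] at hpin; simp at hpin
          | some p =>
            rw [hpq] at hpin
            have hpin' : PySem.Set.contains rc.1 p = true := hpin
            obtain ⟨k, hkp⟩ := hinv p hpin'
            refine ⟨k+1, ?_⟩
            have hgd : PySem.Dict.getD L (some x) none = some p := by
              have hg := hits (cq, pq) (by simp)
              simp only [hcq, hpq] at hg
              rw [PySem.Dict.getD_eq_get?_getD, hg]; rfl
            rw [pvReachS_unfold, hgd]
            simp only [Bool.or_eq_true, Bool.and_eq_true]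
            exact Or.inr ⟨hcne, hkp⟩
      · exact hinv x hx

lemma pvClose_sound (L : PySem.Dict (Option String) (Option String))
    (hk : L.keys.Nodup) (R0 : PySem.Set String) :
    ∀ (fuel : Nat) (R : PySem.Set String),
      (∀ x, PySem.Set.contains R x = true → ∃ k, pvReachS L R0 k x = true) →
      ∀ s, PySem.Set.contains (pvClose L.items fuel R) s = true →
        ∃ k, pvReachS L R0 k s = true := by
  have hits : ∀ it ∈ L.items, PySem.Dict.get? L it.1 = some it.2 := by
    intro it hmem
    exact PySem.Dict.get?_of_mem_items L (by exact hmem) hk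
  intro fuel
  induction fuel with
  | zero => intro R hinv s hs; exact hinv s hs
  | succ f ih =>
    intro R hinv s hs
    simp only [pvClose] at hs
    cases hch : (L.items.foldl pvRoundStep (R, false)).2 with
    | true =>
      rw [hch, if_pos rfl] at hs
      exact ih _ (fun x hx => pvRound_sound L R0 L.items hits (R, false) hinv x hx) s hs
    | false =>
      rw [hch, if_neg (by simp)] at hs
      exact pvRound_sound L R0 L.items hits (R, false) hinv s hs

-- pigeonhole: the nodes of a minimal chain are distinct and all carry keys of the parent
-- dict, so a minimal certificate is bounded by the number of keys.
lemma pvReach_min_chain (L : PySem.Dict (Option String) (Option String))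
    (R0 : PySem.Set String) :
    ∀ (k : Nat) (s : String), pvReachS L R0 k s = true →
      (∀ j, j < k → pvReachS L R0 j s = false) →
      ∃ cs : List String, cs.length = k ∧ (∀ c ∈ cs, (some c) ∈ L.keys) ∧
        ∀ i (hi : i < cs.length),
          pvReachS L R0 (k - i) cs[i] = true ∧
          ∀ j, j < k - i → pvReachS L R0 j cs[i] = false := by
  intro k
  induction k with
  | zero => intro s _ _; exact ⟨[], rfl, by simp, by simp⟩
  | succ n ih =>
    intro s hreach hmin
    have hreach' := hreach
    rw [pvReachS_unfold] at hreach
    simp only [Bool.or_eq_true, Bool.and_eq_true] at hreach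
    rcases hreach with hc | ⟨hne, hm⟩
    · exact absurd (show pvReachS L R0 0 s = true from hc)
        (by simp [hmin 0 (by omega)])
    · cases hL : PySem.Dict.getD L (some s) none with
      | none => rw [hL] at hm; simp at hm
      | some p =>
        rw [hL] at hm
        have hmp : pvReachS L R0 n p = true := hm
        have hpmin : ∀ i, i < n → pvReachS L R0 i p = false := by
          intro i hij
          by_contra hcon
          have hip : pvReachS L R0 i p = true := eq_true_of_ne_false hcon
          have hsi : pvReachS L R0 (i+1) s = true := by
            rw [pvReachS_unfold, hL]
            simp only [Bool.or_eq_true, Bool.and_eq_true]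
            exact Or.inr ⟨hne, hip⟩
          exact absurd hsi (by simp [hmin (i+1) (by omega)])
        obtain ⟨cs, hlen, hkeys, hidx⟩ := ih p hmp hpmin
        have hskey : (some s : Option String) ∈ L.keys := by
          have hcont : PySem.Dict.contains L (some s) = true := by
            by_contra hnc
            have hn : PySem.Dict.getD L (some s) none = none :=
              PySem.Dict.getD_of_not_contains L none (by simpa using hnc)
            rw [hL] at hn; exact absurd hn (by simp)
          exact (PySem.Dict.contains_iff_mem_keys L (some s)).mp hcont
        refine ⟨s :: cs, by simp [hlen], ?_, ?_⟩
        · intro c hcmem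
          rcases List.mem_cons.mp hcmem with rfl | hcmem'
          · exact hskey
          · exact hkeys c hcmem'
        · intro i hi
          cases i with
          | zero =>
            refine ⟨by simpa using hreach', fun j hj => hmin j (by simpa using hj)⟩
          | succ t =>
            have ht : t < cs.length := by
              simp only [List.length_cons] at hi; omega
            have hidx' := hidx t ht
            constructor
            · have h1 := hidx'.1
              have harith : n + 1 - (t + 1) = n - t := by omega
              rw [harith]
              simpa using h1
            · intro jj hjj
              have harith : n + 1 - (t + 1) = n - t := by omega
              rw [harith] at hjj
              have h2 := hidx'.2 jj hjj
              simpa using h2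

lemma pvReach_bound (L : PySem.Dict (Option String) (Option String)) (R0 : PySem.Set String)
    (k : Nat) (s : String) (h : pvReachS L R0 k s = true) :
    ∃ k', k' ≤ L.keys.length ∧ pvReachS L R0 k' s = true := by
  have hex : ∃ m, pvReachS L R0 m s = true := ⟨k, h⟩
  classical
  have hm : pvReachS L R0 (Nat.find hex) s = true := Nat.find_spec hex
  have hmin : ∀ j, j < Nat.find hex → pvReachS L R0 j s = false := by
    intro j hj
    have := Nat.find_min hex hj
    exact Bool.eq_false_iff.mpr (by simpa using this)
  obtain ⟨cs, hlen, hkeys, hidx⟩ := pvReach_min_chain L R0 (Nat.find hex) s hm hmin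
  have hnodup : cs.Nodup := by
    rw [List.Nodup, List.pairwise_iff_getElem]
    intro i j hi hj hij heq
    have hI := hidx i hi
    have hJ := hidx j hj
    have hlt : Nat.find hex - j < Nat.find hex - i := by omega
    have hJt := hJ.1
    rw [← heq] at hJt
    exact absurd hJt (by simp [hI.2 (Nat.find hex - j) hlt])
  have hsub : (cs.map (fun c => (some c : Option String))) ⊆ L.keys := by
    intro x hx
    obtain ⟨c, hcmem, rfl⟩ := List.mem_map.mp hx
    exact hkeys c hcmem
  have hnodup' : (cs.map (fun c => (some c : Option String))).Nodup :=
    hnodup.map (fun a b hab => by simpa using hab)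
  have hsp := List.subperm_of_subset hnodup' hsub
  have hle : cs.length ≤ L.keys.length := by
    have := List.Subperm.length_le hsp
    simpa using this
  exact ⟨Nat.find hex, by omega, hm⟩

lemma pvBuildLookup_keys_nodup (completed : List (List (String × Option String))) :
    (pvBuildLookup completed).keys.Nodup := by
  unfold pvBuildLookup
  have hgen : ∀ (l : List (List (String × Option String)))
      (d : PySem.Dict (Option String) (Option String)), d.keys.Nodup →
      (l.foldl (fun d n =>
        match PySem.Dict.get? (PySem.Dict.mk n) "id" with
        | some k => d.insert k (PySem.Dict.getD (PySem.Dict.mk n) "parent_id" none)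
        | none => d) d).keys.Nodup := by
    intro l
    induction l with
    | nil => intro d hd; exact hd
    | cons n rest ih =>
      intro d hd
      rw [List.foldl_cons]
      cases hg : PySem.Dict.get? (PySem.Dict.mk n) "id" with
      | none => exact ih d hd
      | some key => exact ih _ (PySem.Dict.nodup_keys_insert d key _ hd)
  exact hgen completed PySem.Dict.empty PySem.Dict.nodup_keys_empty

lemma pvBuildLookup_keys_len (completed : List (List (String × Option String))) :
    (pvBuildLookup completed).keys.length ≤ completed.length := by
  unfold pvBuildLookup
  have hgen : ∀ (l : List (List (String × Option String)))
      (d : PySem.Dict (Option String) (Option String)),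
      (l.foldl (fun d n =>
        match PySem.Dict.get? (PySem.Dict.mk n) "id" with
        | some k => d.insert k (PySem.Dict.getD (PySem.Dict.mk n) "parent_id" none)
        | none => d) d).keys.length ≤ d.keys.length + l.length := by
    intro l
    induction l with
    | nil => intro d; simp
    | cons n rest ih =>
      intro d
      rw [List.foldl_cons]
      cases hg : PySem.Dict.get? (PySem.Dict.mk n) "id" with
      | none =>
        have := ih d
        simp only [List.length_cons]; omega
      | some key =>
        have hins : (d.insert key (PySem.Dict.getD (PySem.Dict.mk n) "parent_id" none)).keys.length ≤ d.keys.length + 1 := by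
          by_cases hcon : PySem.Dict.contains d key = true
          · rw [PySem.Dict.keys_insert_of_contains d _ hcon]; omega
          · rw [PySem.Dict.keys_insert_of_not_contains d _ (by simpa using hcon)]
            simp
        have := ih (d.insert key (PySem.Dict.getD (PySem.Dict.mk n) "parent_id" none))
        simp only [List.length_cons]; omega
  have := hgen completed PySem.Dict.empty
  simpa [PySem.Dict.keys_empty] using this

-- ===== VERDICT (by name: the statement is the Claim_ definition above) =====
theorem is_descendant_of_py_spec : Claim_equal_is_descendant_of_py := by
  intro node root_id completed _ _
  unfold Spec_is_descendant_of_py is_descendant_of_py is_descendant_of_py_alt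
  by_cases hroot : root_id = ""
  · rw [hroot]
    rw [pvLoopA_root_empty (pvBuildLookup completed) (completed.length + 2) PySem.Set.empty
      (PySem.Dict.getD (PySem.Dict.mk node) "parent_id" none)]
    simp
  · have hbeq : (root_id == "") = false := by simp [hroot]
    simp only [hbeq, Bool.false_eq_true, if_false]
    have hnd := pvBuildLookup_keys_nodup completed
    have hkl := pvBuildLookup_keys_len completed
    have hR0 : ∀ x, PySem.Set.contains (PySem.Set.add PySem.Set.empty root_id) x
        = (x == root_id) := by
      intro x
      by_cases hx : x = root_id
      · rw [hx]
        have hmem : root_id ∈ PySem.Set.add PySem.Set.empty root_id := by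
          simp [PySem.Set.empty]
        rw [(PySem.Set.contains_iff _ _).mpr hmem]
        simp
      · have hnm : x ∉ PySem.Set.add PySem.Set.empty root_id := by
          simp [PySem.Set.empty, hx]
        have hcf : PySem.Set.contains (PySem.Set.add PySem.Set.empty root_id) x = false := by
          cases hcc : PySem.Set.contains (PySem.Set.add PySem.Set.empty root_id) x
          · rfl
          · exact absurd ((PySem.Set.contains_iff _ _).mp hcc) hnm
        rw [hcf]
        simp [hx]
    cases hstart : PySem.Dict.getD (PySem.Dict.mk node) "parent_id" none with
    | none =>
      have hnone : ∀ g v, pvLoopA (pvBuildLookup completed) root_id g v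
          (none : Option String) = false := by
        intro g v; cases g <;> rfl
      rw [hnone]
    | some s =>
      by_cases hs : s = ""
      · rw [hs]
        have hL1 : pvLoopA (pvBuildLookup completed) root_id (completed.length + 2)
            PySem.Set.empty (some "") = false := by
          have hexp : ∃ g, completed.length + 2 = g + 1 := ⟨completed.length + 1, rfl⟩
          obtain ⟨g, hg⟩ := hexp
          rw [hg]
          simp [pvLoopA]
        rw [hL1]
        simp
      · cases hcont : PySem.Set.contains
            (pvClose (pvBuildLookup completed).items (completed.length + 1)
              (PySem.Set.add PySem.Set.empty root_id)) s with
        | true =>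
          obtain ⟨k, hk⟩ := pvClose_sound (pvBuildLookup completed) hnd
            (PySem.Set.add PySem.Set.empty root_id) (completed.length + 1)
            (PySem.Set.add PySem.Set.empty root_id) (fun x hx => ⟨0, hx⟩) s hcont
          obtain ⟨m, hmle, hmr⟩ := pvReach_bound (pvBuildLookup completed)
            (PySem.Set.add PySem.Set.empty root_id) k s hk
          have hloop := pvReach_loopA (pvBuildLookup completed) root_id
            (PySem.Set.add PySem.Set.empty root_id) hR0 hroot m s PySem.Set.empty
            (completed.length + 2) hmr
            (by
              intro x hx j hj
              exact absurd ((PySem.Set.contains_iff _ _).mp hx)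
                (by simp [PySem.Set.empty]))
            (by omega)
          rw [hloop]
          dsimp only
          rw [hcont]
          simp [hs]
        | false =>
          cases hloop : pvLoopA (pvBuildLookup completed) root_id (completed.length + 2)
              PySem.Set.empty (some s) with
          | false => dsimp only; rw [hcont]; simp
          | true =>
            exfalso
            obtain ⟨k, hklt, hk⟩ := pvLoopA_reach (pvBuildLookup completed) root_id
              (PySem.Set.add PySem.Set.empty root_id) hR0 (completed.length + 2)
              PySem.Set.empty s hloop
            have hin := pvClose_complete (pvBuildLookup completed) (completed.length + 1)
              (PySem.Set.add PySem.Set.empty root_id) k s (by omega) hk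
            rw [hcont] at hin
            exact absurd hin (by simp)
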